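-- pv_equiv track=rewrite | github.com/Venditum/Venditum | Rekursion.py | V_Q
-- ===== SOURCE A (Python) =====
-- def V_Q(zahl: int, verdoppeln: bool) -> int:
--     if zahl >= 1000000:
--         return zahl
--     elif verdoppeln:
--         zahl *= 2
--         return V_Q(zahl, False)
--     else:
--         zahl *= 2
--         return V_Q(zahl, True)
-- ===== SOURCE B (Python) =====
-- def V_Q(zahl: int, verdoppeln: bool) -> int:
--     # closed form: smallest k >= 0 with zahl * 2**k >= 1000000 is (999999 // zahl).bit_length()
--     return zahl << (999999 // zahl).bit_length()
-- ===== Notes on version B (the rewrite author's own statement) =====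
-- stated objective: simpler
-- what changed: Replaces the mutual-flag doubling recursion with a one-line closed form: zahl << (999999 // zahl).bit_length(), the smallest power of two reaching 1000000.
import Mathlib
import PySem

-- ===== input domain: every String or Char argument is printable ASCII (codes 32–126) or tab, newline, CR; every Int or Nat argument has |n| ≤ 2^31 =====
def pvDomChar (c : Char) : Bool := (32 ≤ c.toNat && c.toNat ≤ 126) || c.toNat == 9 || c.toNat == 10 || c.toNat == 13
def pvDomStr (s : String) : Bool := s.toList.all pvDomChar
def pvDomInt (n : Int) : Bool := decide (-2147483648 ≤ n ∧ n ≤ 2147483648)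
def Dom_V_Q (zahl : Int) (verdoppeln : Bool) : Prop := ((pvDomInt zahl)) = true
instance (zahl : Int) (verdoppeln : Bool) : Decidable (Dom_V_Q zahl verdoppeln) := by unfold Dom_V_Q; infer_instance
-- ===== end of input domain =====

-- B replaces the mutual-flag doubling recursion by a closed form (shift by the bit length of 999999 // zahl); simpler.
-- A raises RecursionError for zahl <= 0; those inputs are excluded by Pre_.


-- ===== PORT A =====
-- fuel only makes the recursion total; 64 is never exhausted on Pre_ (the proof shows ≤ 20 steps are taken there)
def V_Q_go : Nat → Int → Bool → Int
  | 0, zahl, _ => zahl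
  | n + 1, zahl, verdoppeln =>
    if zahl ≥ 1000000 then zahl
    else if verdoppeln then V_Q_go n (zahl * 2) false
    else V_Q_go n (zahl * 2) true

def V_Q (zahl : Int) (verdoppeln : Bool) : Int := V_Q_go 64 zahl verdoppeln

-- ===== PORT B =====
-- zahl << (999999 // zahl).bit_length()
def V_Q_alt (zahl : Int) (verdoppeln : Bool) : Int :=
  zahl * 2 ^ PySem.Int.bitLength (PySem.Int.floordiv 999999 zahl)

-- ===== PRECONDITION & SPEC =====
-- Pre_ excludes zahl ≤ 0, where A recurses forever (RecursionError)
def Pre_V_Q (zahl : Int) (verdoppeln : Bool) : Prop := 1 ≤ zahl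
instance (zahl : Int) (verdoppeln : Bool) : Decidable (Pre_V_Q zahl verdoppeln) := by unfold Pre_V_Q; infer_instance
def pvWitness_V_Q : Int × Bool := (5, true)

def Spec_V_Q (zahl : Int) (verdoppeln : Bool) (out : Int) : Prop := out = V_Q_alt zahl verdoppeln
instance (zahl : Int) (verdoppeln : Bool) (out : Int) : Decidable (Spec_V_Q zahl verdoppeln out) := by unfold Spec_V_Q; infer_instance

-- ===== CLAIM (what is proved, stated in full; the proofs are below) =====
def Claim_equal_V_Q : Prop := ∀ (zahl : Int) (verdoppeln : Bool), Dom_V_Q zahl verdoppeln → Pre_V_Q zahl verdoppeln → Spec_V_Q zahl verdoppeln (V_Q zahl verdoppeln)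
-- ===== LEMMAS AND PROOFS =====

-- floordiv by a positive integer, through Nat
theorem fd_eq (z : Int) (hz : 1 ≤ z) :
    PySem.Int.floordiv 999999 z = ((999999 / z.toNat : Nat) : Int) := by
  have h : z = ((z.toNat : Nat) : Int) := (Int.toNat_of_nonneg (by omega)).symm
  rw [h]
  exact_mod_cast PySem.Int.floordiv_natCast 999999 z.toNat

theorem fd_zero_of_big (z : Int) (hz : 1000000 ≤ z) :
    PySem.Int.floordiv 999999 z = 0 := by
  rw [fd_eq z (by omega)]
  have : 999999 / z.toNat = 0 := Nat.div_eq_of_lt (by omega)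
  simp [this]

theorem fd_pos (z : Int) (h1 : 1 ≤ z) (h2 : z ≤ 999999) :
    0 < PySem.Int.floordiv 999999 z := by
  rw [fd_eq z h1]
  have : 0 < 999999 / z.toNat := Nat.div_pos (by omega) (by omega)
  exact_mod_cast this

theorem bl_step (z : Int) (h1 : 1 ≤ z) (h2 : z ≤ 999999) :
    PySem.Int.bitLength (PySem.Int.floordiv 999999 z)
      = PySem.Int.bitLength (PySem.Int.floordiv 999999 (z * 2)) + 1 := by
  have hq : PySem.Int.floordiv 999999 (z * 2)
      = PySem.Int.floordiv (PySem.Int.floordiv 999999 z) 2 := by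
    rw [fd_eq z h1, fd_eq (z * 2) (by omega)]
    have hz2 : (z * 2).toNat = z.toNat * 2 := by omega
    rw [hz2, ← Nat.div_div_eq_div_mul]
    exact (PySem.Int.floordiv_natCast (999999 / z.toNat) 2).symm
  rw [hq]
  exact PySem.Int.bitLength_of_pos (fd_pos z h1 h2)

theorem bl_le_20 (z : Int) (h1 : 1 ≤ z) :
    PySem.Int.bitLength (PySem.Int.floordiv 999999 z) ≤ 20 := by
  set q := PySem.Int.floordiv 999999 z with hqdef
  by_cases h0 : q = 0
  · simp [h0]
  · have hle : q.natAbs ≤ 999999 := by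
      rw [hqdef, fd_eq z h1]
      have := Nat.div_le_self 999999 z.toNat
      simp only [Int.natAbs_natCast]
      omega
    have h2 : 2 ^ (PySem.Int.bitLength q - 1) ≤ q.natAbs := PySem.Int.two_pow_bitLength_le q h0
    by_contra hgt
    push Not at hgt
    have : (2 : Nat) ^ 20 ≤ 2 ^ (PySem.Int.bitLength q - 1) :=
      Nat.pow_le_pow_right (by norm_num) (by omega)
    omega

theorem go_eq (n : Nat) : ∀ (z : Int) (v : Bool), 1 ≤ z →
    PySem.Int.bitLength (PySem.Int.floordiv 999999 z) ≤ n →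
    V_Q_go n z v = z * 2 ^ PySem.Int.bitLength (PySem.Int.floordiv 999999 z) := by
  induction n with
  | zero =>
    intro z v h1 hbl
    have h0 : PySem.Int.bitLength (PySem.Int.floordiv 999999 z) = 0 := by omega
    simp [V_Q_go, h0]
  | succ n ih =>
    intro z v h1 hbl
    by_cases hbig : 1000000 ≤ z
    · rw [fd_zero_of_big z hbig]
      simp [V_Q_go, hbig, PySem.Int.bitLength_zero]
    · push Not at hbig
      have hstep := bl_step z h1 (by omega)
      have hrec : V_Q_go (n + 1) z v = V_Q_go n (z * 2) (!v) := by
        cases v <;> simp [V_Q_go] <;> intro h <;> omega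
      rw [hrec, ih (z * 2) (!v) (by omega) (by omega), hstep]
      ring

-- ===== VERDICT (by name: the statement is the Claim_ definition above) =====
theorem V_Q_spec : Claim_equal_V_Q := by
  intro z v _ hpre
  unfold Spec_V_Q V_Q V_Q_alt
  exact go_eq 64 z v hpre (by have := bl_le_20 z hpre; omega)
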